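-- pv_equiv track=rewrite | github.com/thomas-vogel/sapienzdiv-ssbse19 | postprocess/analysis_study1.py | get_property_header
-- ===== SOURCE A (Python) =====
-- def get_property_header(properties, methods, dc, empty_column):
--     number_of_methods = len(methods)
--     header = empty_column + empty_column
--     for property in properties:
--         header = header + property + dc
--         for i in range(number_of_methods-1):
--             header = header + "--" + dc
--         header = header + " " + dc
--     return header
-- ===== SOURCE B (Python) =====
-- def get_property_header(properties, methods, dc, empty_column):
--     cells = ("--" + dc) * (len(methods) - 1)
--     parts = [empty_column + empty_column]
--     for property in properties:
--         parts.append(property + dc + cells + " " + dc)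
--     return "".join(parts)
-- ===== Notes on version B (the rewrite author's own statement) =====
-- stated objective: simpler
-- what changed: The inner counting loop over range(len(methods)-1) is replaced by computing the separator cells once as a string multiplication, and the header is assembled by collecting per-property segments in a list joined at the end instead of repeated string concatenation.
import Mathlib
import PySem

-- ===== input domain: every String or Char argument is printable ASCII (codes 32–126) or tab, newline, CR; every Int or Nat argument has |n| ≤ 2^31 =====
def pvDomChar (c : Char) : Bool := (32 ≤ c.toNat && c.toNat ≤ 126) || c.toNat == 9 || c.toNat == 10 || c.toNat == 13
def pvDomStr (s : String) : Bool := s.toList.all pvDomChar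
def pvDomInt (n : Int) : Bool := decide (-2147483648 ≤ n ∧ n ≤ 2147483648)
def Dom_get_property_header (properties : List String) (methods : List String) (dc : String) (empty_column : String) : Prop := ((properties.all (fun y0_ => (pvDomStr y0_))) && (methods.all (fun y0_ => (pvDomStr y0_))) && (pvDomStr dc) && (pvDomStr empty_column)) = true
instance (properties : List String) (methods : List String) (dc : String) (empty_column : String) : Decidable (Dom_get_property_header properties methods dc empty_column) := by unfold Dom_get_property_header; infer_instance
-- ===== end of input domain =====

-- B replaces the inner range-counting loop by computing the separator cells once
-- (string replication) and joining per-property segments collected in a list: simpler.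

-- ===== PORT A =====
-- literal transliteration: outer loop over properties, inner loop over range(number_of_methods-1)
def get_property_header (properties : List String) (methods : List String) (dc : String) (empty_column : String) : String :=
  let number_of_methods : Int := (methods.length : Int)
  let header := empty_column ++ empty_column
  properties.foldl (fun header property =>
    let header := header ++ property ++ dc
    let header := (PySem.List.pyRange 0 (number_of_methods - 1) 1).foldl
      (fun header _ => header ++ "--" ++ dc) header
    header ++ " " ++ dc) header

-- ===== PORT B =====
-- ("--"+dc)*(len(methods)-1) ported as join of replicate; Python's negative multiplier
-- (empty methods) yields "", exactly as Nat truncated subtraction does here.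
def get_property_header_alt (properties : List String) (methods : List String) (dc : String) (empty_column : String) : String :=
  let cells := String.join (List.replicate (methods.length - 1) ("--" ++ dc))
  let parts := properties.foldl
    (fun parts property => parts ++ [property ++ dc ++ cells ++ " " ++ dc])
    [empty_column ++ empty_column]
  String.join parts

-- ===== PRECONDITION & SPEC =====
def Spec_get_property_header (properties : List String) (methods : List String) (dc : String) (empty_column : String) (out : String) : Prop := out = get_property_header_alt properties methods dc empty_column
instance (properties : List String) (methods : List String) (dc : String) (empty_column : String) (out : String) : Decidable (Spec_get_property_header properties methods dc empty_column out) := by unfold Spec_get_property_header; infer_instance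

-- ===== CLAIM (what is proved, stated in full; the proofs are below) =====
def Claim_equal_get_property_header : Prop := ∀ (properties : List String) (methods : List String) (dc : String) (empty_column : String), Dom_get_property_header properties methods dc empty_column → Spec_get_property_header properties methods dc empty_column (get_property_header properties methods dc empty_column)

-- ===== LEMMAS AND PROOFS =====

theorem join_foldl (l : List String) (a : String) : l.foldl (· ++ ·) a = a ++ String.join l := by
  induction l generalizing a with
  | nil => simp [String.join]
  | cons s t ih => simp [String.join, List.foldl_cons, ih (a ++ s), ih s, String.append_assoc]

theorem join_cons (s : String) (l : List String) : String.join (s :: l) = s ++ String.join l := by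
  have : String.join (s :: l) = (s :: l).foldl (· ++ ·) "" := by simp [String.join]
  rw [this, List.foldl_cons, join_foldl]; simp

-- A's inner loop appends "--" ++ dc once per range element
theorem inner_loop_eq (l : List Int) (dc acc : String) :
    l.foldl (fun h (_ : Int) => h ++ "--" ++ dc) acc
      = acc ++ String.join (List.replicate l.length ("--" ++ dc)) := by
  induction l generalizing acc with
  | nil => simp [String.join]
  | cons x t ih =>
      simp only [List.foldl_cons, ih, List.length_cons, List.replicate_succ, join_cons]
      simp [String.append_assoc]

theorem pyRange_len (n : Nat) :
    (PySem.List.pyRange 0 ((n : Int) - 1) 1).length = n - 1 := by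
  rw [PySem.List.length_pyRange_one]; omega

-- folding "append one segment per element" is join of the mapped segments
theorem foldl_append_seg (l : List String) (f : String → String) (acc : String) :
    l.foldl (fun h p => h ++ f p) acc = acc ++ String.join (l.map f) := by
  induction l generalizing acc with
  | nil => simp [String.join]
  | cons p t ih => simp [List.foldl_cons, ih, join_cons, String.append_assoc]

-- ===== VERDICT (by name: the statement is the Claim_ definition above) =====
theorem get_property_header_spec : Claim_equal_get_property_header := by
  intro properties methods dc empty_column _
  unfold Spec_get_property_header get_property_header get_property_header_alt
  simp only [PySem.List.foldl_append_singleton_eq_map, inner_loop_eq, pyRange_len]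
  have hb : (fun (header property : String) =>
      header ++ property ++ dc ++ String.join (List.replicate (methods.length - 1) ("--" ++ dc)) ++ " " ++ dc)
    = (fun (header property : String) =>
      header ++ (property ++ dc ++ String.join (List.replicate (methods.length - 1) ("--" ++ dc)) ++ " " ++ dc)) := by
    funext h p; simp [String.append_assoc]
  rw [hb, foldl_append_seg]
  simp [join_cons]
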